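-- pv_equiv track=rewrite | github.com/samarcanda-93/subs-generator | src/processing.py | _find_split_points
-- ===== SOURCE A (Python) =====
-- from typing import List
--
-- def _find_split_points(text: str, delimiter: str, word_boundary: bool = False) -> List[int]:
--     """Find all possible split points for a given delimiter."""
--     split_points = []
--     start = 0
--
--     while True:
--         idx = text.find(delimiter, start)
--         if idx == -1:
--             break
--
--         if word_boundary:
--             # For word boundaries, split after the word
--             split_points.append(idx + len(delimiter))
--         else:
--             # For punctuation, split after the punctuation
--             split_points.append(idx + 1)
--
--         start = idx + 1
--
--     return split_points
-- ===== SOURCE B (Python) =====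
-- from typing import List
--
-- def _find_split_points(text: str, delimiter: str, word_boundary: bool = False) -> List[int]:
--     """Find all possible split points for a given delimiter."""
--     offset = len(delimiter) if word_boundary else 1
--     return [i + offset for i in range(len(text) + 1) if text.startswith(delimiter, i)]
-- ===== Notes on version B (the rewrite author's own statement) =====
-- stated objective: simpler
-- what changed: A's stateful while-loop that repeatedly calls text.find(delimiter, start) and advances past each hit is replaced by a single comprehension that tests text.startswith(delimiter, i) at every position 0..len(text) and emits i+offset on a match.
import Mathlib
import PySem

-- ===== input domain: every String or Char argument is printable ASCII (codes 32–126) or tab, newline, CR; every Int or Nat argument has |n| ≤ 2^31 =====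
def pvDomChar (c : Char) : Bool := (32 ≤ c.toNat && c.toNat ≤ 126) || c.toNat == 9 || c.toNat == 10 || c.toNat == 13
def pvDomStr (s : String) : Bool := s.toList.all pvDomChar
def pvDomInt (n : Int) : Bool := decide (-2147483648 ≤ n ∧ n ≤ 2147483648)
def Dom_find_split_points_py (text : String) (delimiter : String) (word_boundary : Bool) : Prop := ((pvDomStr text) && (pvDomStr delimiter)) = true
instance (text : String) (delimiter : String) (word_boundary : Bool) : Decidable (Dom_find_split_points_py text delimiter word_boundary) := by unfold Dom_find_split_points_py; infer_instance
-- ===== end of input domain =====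

-- B replaces A's find-driven while loop by a single comprehension over every candidate
-- position (objective: simpler — one pass over range(len(text)+1) with startswith).
-- ===== PORT A =====
-- the while loop of A; fuel bounds the iteration count only (start strictly increases,
-- so cs.length + 2 iterations always suffice — proved in the lemmas below)
def pvLoopA (cs d : List Char) (wb : Bool) : Nat → Nat → List Int
  | 0, _ => []
  | fuel+1, start =>
    let idx := PySem.Chars.findFrom cs d (start : Int) none
    if idx = -1 then []
    else (if wb then idx + d.length else idx + 1) :: pvLoopA cs d wb fuel (idx.toNat + 1)

def find_split_points_py (text : String) (delimiter : String) (word_boundary : Bool) : List Int :=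
  pvLoopA text.toList delimiter.toList word_boundary (text.toList.length + 2) 0

-- ===== PORT B =====
-- text.startswith(delimiter, i) with 0 ≤ i ≤ len(text) is exactly
-- startswith on the list dropped at i.
def find_split_points_py_alt (text : String) (delimiter : String) (word_boundary : Bool) : List Int :=
  let offset : Int := if word_boundary then delimiter.toList.length else 1
  ((List.range (text.toList.length + 1)).filter
      (fun i => PySem.Chars.startswith (text.toList.drop i) delimiter.toList)).map
    (fun i : Nat => (i : Int) + offset)

-- ===== PRECONDITION & SPEC =====
def Spec_find_split_points_py (text : String) (delimiter : String) (word_boundary : Bool) (out : List Int) : Prop := out = find_split_points_py_alt text delimiter word_boundary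
instance (text : String) (delimiter : String) (word_boundary : Bool) (out : List Int) : Decidable (Spec_find_split_points_py text delimiter word_boundary out) := by unfold Spec_find_split_points_py; infer_instance

-- ===== CLAIM (what is proved, stated in full; the proofs are below) =====
def Claim_equal_find_split_points_py : Prop := ∀ (text : String) (delimiter : String) (word_boundary : Bool), Dom_find_split_points_py text delimiter word_boundary → Spec_find_split_points_py text delimiter word_boundary (find_split_points_py text delimiter word_boundary)

-- ===== LEMMAS AND PROOFS =====

-- the per-position function B's comprehension computes
def pvF (cs d : List Char) (off : Int) (i : Nat) : Option Int :=
  if PySem.Chars.startswith (cs.drop i) d then some ((i : Int) + off) else none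

lemma pvF_none {cs d : List Char} {off : Int} {i : Nat}
    (h : ¬ d <+: cs.drop i) : pvF cs d off i = none := by
  simp [pvF, PySem.Chars.startswith_iff, h]

lemma pv_infix_of_prefix_drop {cs d : List Char} {start i : Nat}
    (hle : start ≤ i) (h : d <+: cs.drop i) : d <:+: cs.drop start := by
  have hsuf : cs.drop i <:+ cs.drop start := by
    have h0 := List.drop_suffix (i - start) (cs.drop start)
    rw [List.drop_drop, show start + (i - start) = i from by omega] at h0
    exact h0
  exact h.isInfix.trans hsuf.isInfix

lemma pvLoopA_eq (cs d : List Char) (wb : Bool) :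
    ∀ fuel start, start ≤ cs.length + 1 → cs.length + 1 - start < fuel →
    pvLoopA cs d wb fuel start =
      (List.range' start (cs.length + 1 - start)).filterMap
        (pvF cs d (if wb then (d.length : Int) else 1)) := by
  intro fuel
  induction fuel with
  | zero => intro start h1 h2; omega
  | succ f ih =>
    intro start h1 h2
    simp only [pvLoopA]
    by_cases hidx : PySem.Chars.findFrom cs d (start : Int) none = -1
    · rw [if_pos hidx]
      rcases Nat.lt_or_ge start (cs.length + 1) with hlt | hge
      · have hle : start ≤ cs.length := by omega
        have hninf : ¬ d <:+: cs.drop start :=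
          (PySem.Chars.findFrom_natCast_eq_neg_one_iff cs d start hle).mp hidx
        symm
        rw [List.filterMap_eq_nil_iff]
        intro i hi
        rw [List.mem_range'_1] at hi
        apply pvF_none
        intro hpre
        exact hninf (pv_infix_of_prefix_drop hi.1 hpre)
      · have : cs.length + 1 - start = 0 := by omega
        rw [this]
        rfl
    · rw [if_neg hidx]
      have hle : start ≤ cs.length := by
        by_contra hgt
        have hs : start = cs.length + 1 := by omega
        apply hidx
        subst hs
        simp only [PySem.Chars.findFrom]
        rw [if_pos (by push_cast; omega)]
      obtain ⟨hge, hpre, hmin⟩ := PySem.Chars.findFrom_natCast_spec cs d start hle hidx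
      set idx := PySem.Chars.findFrom cs d (start : Int) none with hidxdef
      have hidx0 : 0 ≤ idx := le_trans (by positivity) hge
      have hidxle : idx ≤ cs.length := by
        rw [hidxdef, PySem.Chars.findFrom_natCast cs d start hle]
        split
        · omega
        · have h3 := PySem.Chars.find_le_length (cs.drop start) d
          rw [List.length_drop] at h3
          omega
      set j := idx.toNat with hjdef
      have hjidx : (j : Int) = idx := Int.toNat_of_nonneg hidx0
      have hjs : start ≤ j := by omega
      have hjl : j ≤ cs.length := by omega
      have hsplit : cs.length + 1 - start = (j - start) + ((cs.length - j) + 1) := by omega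
      rw [hsplit, ← List.range'_append_1, List.filterMap_append,
        List.range'_succ, List.filterMap_cons]
      have hnone : (List.range' start (j - start)).filterMap
          (pvF cs d (if wb then (d.length : Int) else 1)) = [] := by
        rw [List.filterMap_eq_nil_iff]
        intro i hi
        rw [List.mem_range'_1] at hi
        exact pvF_none (hmin i hi.1 (by omega))
      have hsome : pvF cs d (if wb then (d.length : Int) else 1) (start + (j - start)) =
          some ((if wb then idx + d.length else idx + 1)) := by
        have hsj : start + (j - start) = j := by omega
        rw [hsj]
        simp only [pvF, PySem.Chars.startswith_iff]
        rw [if_pos (by exact hpre)]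
        cases wb <;> simp [hjidx]
      rw [hnone, hsome]
      simp only [List.nil_append, List.cons.injEq, true_and]
      have hstep : start + (j - start) + 1 = j + 1 := by omega
      rw [hstep]
      have hfuel : cs.length + 1 - (j + 1) < f := by omega
      have htail := ih (j + 1) (by omega) hfuel
      rw [show cs.length + 1 - (j + 1) = cs.length - j from by omega] at htail
      rw [htail]

-- the comprehension of B as a filterMap, to line the loop characterisation up
lemma pv_filter_map_eq (l : List Nat) (p : Nat → Bool) (g : Nat → Int) :
    l.filterMap (fun i => if p i then some (g i) else none) = (l.filter p).map g := by
  induction l with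
  | nil => rfl
  | cons a t ih => by_cases h : p a <;> simp [h, ih]

-- ===== VERDICT (by name: the statement is the Claim_ definition above) =====
theorem find_split_points_py_spec : Claim_equal_find_split_points_py := by
  intro text delimiter wb _
  unfold Spec_find_split_points_py find_split_points_py find_split_points_py_alt
  rw [pvLoopA_eq text.toList delimiter.toList wb (text.toList.length + 2) 0
        (Nat.zero_le _) (by omega)]
  simp only [Nat.sub_zero]
  rw [← List.range_eq_range']
  rw [show (pvF text.toList delimiter.toList
        (if wb then (delimiter.toList.length : Int) else 1)) =
      (fun i => if PySem.Chars.startswith (text.toList.drop i) delimiter.toList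
        then some ((i : Int) + (if wb then (delimiter.toList.length : Int) else 1)) else none)
      from funext (fun i => rfl)]
  rw [pv_filter_map_eq]
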